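-- pv_equiv track=rewrite | github.com/VitTapLamDev/BTTH_TT-ATTT | CODE/24.py | count_number_prime
-- ===== SOURCE A (Python) =====
-- import math
--
-- def check_prime(n):
--     if n <= 1: return False
--     if n == 2: return True
--     else:
--         for i in range(2, math.ceil(math.sqrt(n) +1)):
--             if n % i == 0:
--                 return False
--     return True
--
-- def count_number_prime(number_a, number_b, S1, S2):
--     S = []
--     for i in S1:
--         for j in S2:
--             sum = i + j
--             if sum >= number_a and sum <= number_b \
--                     and check_prime(sum) and sum not in S:
--                 S.append(sum)
--     return S
-- ===== SOURCE B (Python) =====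
-- import math
--
-- def count_number_prime(number_a, number_b, S1, S2):
--     # staged pipeline: all pair sums -> ordered dedup -> range filter ->
--     # sieve primes up to isqrt(max candidate) -> divide by primes only
--     sums = list(dict.fromkeys(i + j for i in S1 for j in S2))
--     lo = max(2, number_a)
--     cand = [s for s in sums if lo <= s <= number_b]
--     if not cand:
--         return []
--     r = math.isqrt(max(cand))
--     composite = set()
--     for p in range(2, r + 1):
--         composite.update(range(p * p, r + 1, p))
--     primes = [p for p in range(2, r + 1) if p not in composite]
--     return [s for s in cand if all(p * p > s or s % p != 0 for p in primes)]
-- ===== Notes on version B (the rewrite author's own statement) =====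
-- stated objective: alternative
-- what changed: B replaces A's nested accumulate-loop (per-pair range check, list-scan dedup, per-pair trial division by every integer up to ceil(sqrt(s))) with a staged pipeline: flatten all pair sums, ordered dedup via dict.fromkeys, range filter, a sieve of Eratosthenes up to isqrt(max candidate) yielding a prime list, and a final filter dividing each distinct candidate only by those primes.
import Mathlib
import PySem

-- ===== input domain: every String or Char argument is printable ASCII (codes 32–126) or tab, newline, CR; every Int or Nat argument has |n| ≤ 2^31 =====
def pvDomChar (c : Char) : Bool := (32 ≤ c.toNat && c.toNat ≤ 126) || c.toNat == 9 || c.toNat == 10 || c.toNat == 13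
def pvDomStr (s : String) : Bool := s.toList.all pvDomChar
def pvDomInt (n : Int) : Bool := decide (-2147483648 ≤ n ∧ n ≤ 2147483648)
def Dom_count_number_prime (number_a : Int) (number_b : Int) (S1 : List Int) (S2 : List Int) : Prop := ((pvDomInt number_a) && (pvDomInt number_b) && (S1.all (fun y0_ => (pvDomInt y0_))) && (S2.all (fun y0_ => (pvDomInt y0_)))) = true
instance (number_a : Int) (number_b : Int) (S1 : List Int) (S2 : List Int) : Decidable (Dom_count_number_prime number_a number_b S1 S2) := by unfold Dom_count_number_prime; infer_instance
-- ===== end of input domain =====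

-- B replaces A's nested accumulate-loop (per-pair range check, list-scan dedup, per-pair
-- trial division) with a staged pipeline: flatten all pair sums, ordered dedup, range
-- filter, a sieve of Eratosthenes up to isqrt(max candidate) yielding a prime list, then
-- a final filter dividing each distinct candidate only by those primes (objective: alternative).

-- ===== PORT A =====
-- math.ceil(math.sqrt(n) + 1) modelled with the integer square root:
-- ceil(sqrt n + 1) = isqrt n + 1 if n is a perfect square, else isqrt n + 2;
-- this model is exact for 0 <= n <= 2^32, which covers every sum reachable inside Dom.
def check_prime (n : Int) : Bool :=
  if n ≤ 1 then false
  else if n = 2 then true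
  else
    let r : Nat := Nat.sqrt n.toNat
    let bound : Int := if r * r = n.toNat then (r : Int) + 1 else (r : Int) + 2
    (PySem.List.pyRange 2 bound 1).all (fun i => !(PySem.Int.mod n i == 0))

def count_number_prime (number_a : Int) (number_b : Int) (S1 : List Int) (S2 : List Int) : List Int :=
  S1.foldl (fun S i =>
    S2.foldl (fun S j =>
      let sum := i + j
      if sum ≥ number_a ∧ sum ≤ number_b ∧ check_prime sum = true ∧ sum ∉ S
      then S ++ [sum] else S) S) []

-- ===== PORT B =====
def count_number_prime_alt (number_a : Int) (number_b : Int) (S1 : List Int) (S2 : List Int) : List Int :=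
  -- sums = list(dict.fromkeys(i + j for i in S1 for j in S2))
  let sums := PySem.List.dedup (S1.flatMap (fun i => S2.map (fun j => i + j)))
  -- lo = max(2, number_a); cand = [s for s in sums if lo <= s <= number_b]
  let lo := max 2 number_a
  let cand := sums.filter (fun s => decide (lo ≤ s ∧ s ≤ number_b))
  -- if not cand: return [];  limit = max(cand) (max? = none exactly on the empty list)
  match PySem.List.max? cand (fun x => x) with
  | none => []
  | some limit =>
    -- r = math.isqrt(max(cand))  (candidates are ≥ 2, so toNat is exact)
    let r : Int := ((Nat.sqrt limit.toNat : Nat) : Int)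
    -- composite = set(); for p in range(2, r+1): composite.update(range(p*p, r+1, p))
    let composite : PySem.Set Int := (PySem.List.pyRange 2 (r + 1) 1).foldl
        (fun c p => PySem.Set.update c (PySem.List.pyRange (p * p) (r + 1) p)) PySem.Set.empty
    -- primes = [p for p in range(2, r+1) if p not in composite]
    let primes := (PySem.List.pyRange 2 (r + 1) 1).filter (fun p => !(PySem.Set.contains composite p))
    -- return [s for s in cand if all(p*p > s or s % p != 0 for p in primes)]
    cand.filter (fun s => primes.all (fun p => decide (p * p > s) || !(PySem.Int.mod s p == 0)))

-- ===== PRECONDITION & SPEC =====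
def Spec_count_number_prime (number_a : Int) (number_b : Int) (S1 : List Int) (S2 : List Int) (out : List Int) : Prop := out = count_number_prime_alt number_a number_b S1 S2
instance (number_a : Int) (number_b : Int) (S1 : List Int) (S2 : List Int) (out : List Int) : Decidable (Spec_count_number_prime number_a number_b S1 S2 out) := by unfold Spec_count_number_prime; infer_instance

-- ===== CLAIM (what is proved, stated in full; the proofs are below) =====
def Claim_equal_count_number_prime : Prop := ∀ (number_a : Int) (number_b : Int) (S1 : List Int) (S2 : List Int), Dom_count_number_prime number_a number_b S1 S2 → Spec_count_number_prime number_a number_b S1 S2 (count_number_prime number_a number_b S1 S2)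

-- ===== LEMMAS AND PROOFS =====

-- the arithmetic meaning of A's primality test
def GoodInt (n : Int) : Prop := 2 ≤ n ∧ ∀ m : Int, 2 ≤ m → m * m ≤ n → ¬ m ∣ n

theorem sqrt_add_two_le (N : Nat) (h3 : 3 ≤ N) : Nat.sqrt N + 2 ≤ N := by
  by_cases hr : Nat.sqrt N ≤ 1
  · omega
  · have h := Nat.sqrt_le' N
    nlinarith

theorem check_prime_iff (n : Int) : check_prime n = true ↔ GoodInt n := by
  by_cases h1 : n ≤ 1
  · have hc : check_prime n = false := by unfold check_prime; simp [h1]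
    rw [hc]
    simp only [Bool.false_eq_true, false_iff]
    exact fun hG => absurd hG.1 (by omega)
  · by_cases h2 : n = 2
    · subst h2
      constructor
      · intro _; exact ⟨by omega, fun m hm hmm => by nlinarith⟩
      · intro _; decide
    · have hn3 : 3 ≤ n := by omega
      unfold check_prime
      rw [if_neg h1, if_neg h2]
      simp only [List.all_eq_true, PySem.List.mem_pyRange_one,
        Bool.not_eq_eq_eq_not, Bool.not_true, beq_eq_false_iff_ne, ne_eq,
        PySem.Int.mod_eq_zero_iff_dvd]
      set r : Nat := Nat.sqrt n.toNat with hr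
      set bound : Int := if r * r = n.toNat then (r : Int) + 1 else (r : Int) + 2 with hb
      have hNn : ((n.toNat : Int)) = n := Int.toNat_of_nonneg (by omega)
      have hbl : ((r : Int) + 1) ≤ bound := by rw [hb]; split_ifs <;> omega
      have hbu : bound ≤ (r : Int) + 2 := by rw [hb]; split_ifs <;> omega
      constructor
      · intro H
        refine ⟨by omega, fun m hm hmm hdvd => ?_⟩
        have hlt : (n.toNat : Int) < ((r : Int) + 1) * ((r : Int) + 1) := by
          have h := Nat.lt_succ_sqrt' n.toNat
          have h' : n.toNat < (r + 1) * (r + 1) := by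
            simpa [pow_two, Nat.succ_eq_add_one] using h
          exact_mod_cast h'
        have hmr : m < (r : Int) + 1 := by nlinarith
        exact H m ⟨hm, by omega⟩ hdvd
      · rintro ⟨-, H⟩ i ⟨hi2, hib⟩ hdvd
        by_cases hii : i * i ≤ n
        · exact H i hi2 hii hdvd
        · obtain ⟨c, hc⟩ := hdvd
          have hipos : (0:Int) < i := by omega
          have hcpos : (0:Int) < c := by nlinarith
          have hci : c < i := by nlinarith
          have hcc : c * c ≤ n := by nlinarith
          have hrn : (r : Int) + 2 ≤ n := by
            have := sqrt_add_two_le n.toNat (by omega)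
            omega
          have hc2 : 2 ≤ c := by
            rcases (by omega : c = 1 ∨ 2 ≤ c) with h | h
            · exfalso; rw [h, mul_one] at hc; omega
            · exact h
          exact H c hc2 hcc ⟨i, by rw [hc]; ring⟩

-- A's dedup-while-accumulating loop, abstracted: seen is the output built so far
def ddA (a b : Int) (seen : List Int) : List Int → List Int
  | [] => []
  | x :: xs =>
    if x ≥ a ∧ x ≤ b ∧ check_prime x = true ∧ x ∉ seen
    then x :: ddA a b (x :: seen) xs
    else ddA a b seen xs

theorem ddA_congr (a b : Int) : ∀ (L s1 s2 : List Int), (∀ t : Int, t ∈ s1 ↔ t ∈ s2) →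
    ddA a b s1 L = ddA a b s2 L := by
  intro L
  induction L with
  | nil => intro _ _ _; rfl
  | cons x xs ih =>
    intro s1 s2 h
    unfold ddA
    by_cases hc : x ≥ a ∧ x ≤ b ∧ check_prime x = true ∧ x ∉ s1
    · rw [if_pos hc, if_pos ⟨hc.1, hc.2.1, hc.2.2.1, fun hm => hc.2.2.2 ((h x).mpr hm)⟩]
      rw [ih (x :: s1) (x :: s2) (fun t => by simp [h t])]
    · rw [if_neg hc, if_neg (fun hc2 => hc ⟨hc2.1, hc2.2.1, hc2.2.2.1,
        fun hm => hc2.2.2.2 ((h x).mp hm)⟩)]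
      exact ih s1 s2 h

def fA (a b : Int) (S : List Int) (s : Int) : List Int :=
  if s ≥ a ∧ s ≤ b ∧ check_prime s = true ∧ s ∉ S then S ++ [s] else S

theorem foldl_fA_eq_ddA (a b : Int) : ∀ (L acc : List Int),
    L.foldl (fA a b) acc = acc ++ ddA a b acc L := by
  intro L
  induction L with
  | nil => intro acc; simp [ddA]
  | cons x xs ih =>
    intro acc
    rw [List.foldl_cons]
    by_cases hc : x ≥ a ∧ x ≤ b ∧ check_prime x = true ∧ x ∉ acc
    · have h1 : fA a b acc x = acc ++ [x] := by unfold fA; rw [if_pos hc]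
      have h2 : ddA a b acc (x :: xs) = x :: ddA a b (x :: acc) xs := by
        unfold ddA; rw [if_pos hc, ← ddA.eq_def]
      rw [h1, h2, ih (acc ++ [x]),
        ddA_congr a b xs (acc ++ [x]) (x :: acc) (fun t => by simp; tauto)]
      simp
    · have h1 : fA a b acc x = acc := by unfold fA; rw [if_neg hc]
      have h2 : ddA a b acc (x :: xs) = ddA a b acc xs := by
        unfold ddA; rw [if_neg hc, ← ddA.eq_def]
      rw [h1, h2]
      exact ih acc

theorem ddA_eq_filter_ofList (a b : Int) : ∀ (L seen : List Int),
    ddA a b seen L = (PySem.Set.ofList L).filter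
      (fun x => decide (x ≥ a ∧ x ≤ b ∧ check_prime x = true ∧ x ∉ seen)) := by
  intro L
  induction L with
  | nil => intro seen; rfl
  | cons x xs ih =>
    intro seen
    rw [PySem.Set.ofList_cons]
    unfold ddA
    by_cases hc : x ≥ a ∧ x ≤ b ∧ check_prime x = true ∧ x ∉ seen
    · rw [if_pos hc]
      simp only [List.filter_cons, decide_eq_true_eq, if_pos hc]
      rw [ih (x :: seen)]
      unfold PySem.Set.discard
      rw [List.filter_filter]
      congr 1
      apply List.filter_congr
      intro t _
      by_cases ht : t = x
      · subst ht
        have hL : ¬(t ≥ a ∧ t ≤ b ∧ check_prime t = true ∧ t ∉ t :: seen) := by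
          intro h; exact h.2.2.2 (List.mem_cons_self)
        rw [decide_eq_false hL, beq_self_eq_true, Bool.not_true, Bool.and_false]
      · by_cases h1 : t ≥ a ∧ t ≤ b ∧ check_prime t = true ∧ t ∉ (x :: seen)
        · rw [decide_eq_true h1, decide_eq_true ⟨h1.1, h1.2.1, h1.2.2.1,
            fun hm => h1.2.2.2 (List.mem_cons_of_mem _ hm)⟩]
          simp [ht]
        · rw [decide_eq_false h1, decide_eq_false (fun h2 => h1 ⟨h2.1, h2.2.1, h2.2.2.1,
            fun hm => h2.2.2.2 (by rcases List.mem_cons.mp hm with h | h; exacts [absurd h ht, h])⟩)]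
          simp
    · rw [if_neg hc]
      simp only [List.filter_cons, decide_eq_true_eq, if_neg hc]
      rw [ih seen]
      unfold PySem.Set.discard
      rw [List.filter_filter]
      apply List.filter_congr
      intro t _
      by_cases ht : t = x
      · subst ht
        rw [decide_eq_false hc]
        simp
      · simp [ht]

theorem nestedA (a b : Int) (S2 : List Int) : ∀ (S1 : List Int) (init : List Int),
    S1.foldl (fun S i =>
      S2.foldl (fun S j =>
        let sum := i + j
        if sum ≥ a ∧ sum ≤ b ∧ check_prime sum = true ∧ sum ∉ S
        then S ++ [sum] else S) S) init
    = (S1.flatMap (fun i => S2.map (fun j => i + j))).foldl (fA a b) init := by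
  intro S1
  induction S1 with
  | nil => intro init; rfl
  | cons i S1 ih =>
    intro init
    simp only [List.foldl_cons, List.flatMap_cons, List.foldl_append]
    rw [← ih]
    congr 1
    show S2.foldl (fun S j => fA a b S (i + j)) init = (S2.map (fun j => i + j)).foldl (fA a b) init
    rw [List.foldl_map]

-- membership in the sieve's composite set
theorem mem_foldl_update (r : Int) : ∀ (L : List Int) (c : PySem.Set Int) (x : Int),
    x ∈ L.foldl (fun c p => PySem.Set.update c (PySem.List.pyRange (p * p) (r + 1) p)) c ↔
      x ∈ c ∨ ∃ p ∈ L, x ∈ PySem.List.pyRange (p * p) (r + 1) p := by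
  intro L
  induction L with
  | nil => intro c x; simp
  | cons p L ih =>
    intro c x
    simp only [List.foldl_cons, ih, PySem.Set.mem_update, List.mem_cons]
    constructor
    · rintro ((h | h) | ⟨q, hq, hx⟩)
      · exact Or.inl h
      · exact Or.inr ⟨p, Or.inl rfl, h⟩
      · exact Or.inr ⟨q, Or.inr hq, hx⟩
    · rintro (h | ⟨q, (rfl | hq), hx⟩)
      · exact Or.inl (Or.inl h)
      · exact Or.inl (Or.inr hx)
      · exact Or.inr ⟨q, hq, hx⟩

-- B's primes list contains every GoodInt q in [2, r]
theorem good_mem_primes (r q : Int) (h2 : 2 ≤ q) (hr : q ≤ r) (hg : GoodInt q) :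
    q ∈ (PySem.List.pyRange 2 (r + 1) 1).filter (fun p =>
      !(PySem.Set.contains ((PySem.List.pyRange 2 (r + 1) 1).foldl
        (fun c p => PySem.Set.update c (PySem.List.pyRange (p * p) (r + 1) p)) PySem.Set.empty) p)) := by
  rw [List.mem_filter]
  refine ⟨PySem.List.mem_pyRange_one.mpr ⟨h2, by omega⟩, ?_⟩
  rw [Bool.not_eq_eq_eq_not, Bool.not_true, ← Bool.not_eq_true,
    PySem.Set.contains_iff, mem_foldl_update]
  rintro (h | ⟨p, hp, hx⟩)
  · simp [PySem.Set.empty] at h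
  · obtain ⟨hp2, -⟩ := PySem.List.mem_pyRange_one.mp hp
    obtain ⟨hpq, -, hdvd⟩ := (PySem.List.mem_pyRange_iff_of_pos (by omega) q).mp hx
    have hpq' : p ∣ q := by
      have h1 : p ∣ p * p := ⟨p, rfl⟩
      have h2 := dvd_add hdvd h1
      simpa using h2
    exact hg.2 p hp2 (by nlinarith) hpq'

-- the sieve-backed divisibility test agrees with GoodInt for 2 ≤ s ≤ limit
theorem test_iff_good (limit s : Int) (h2 : 2 ≤ s) (hsl : s ≤ limit) :
    (((PySem.List.pyRange 2 (((Nat.sqrt limit.toNat : Nat) : Int) + 1) 1).filter (fun p =>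
        !(PySem.Set.contains ((PySem.List.pyRange 2 (((Nat.sqrt limit.toNat : Nat) : Int) + 1) 1).foldl
          (fun c p => PySem.Set.update c
            (PySem.List.pyRange (p * p) (((Nat.sqrt limit.toNat : Nat) : Int) + 1) p)) PySem.Set.empty) p))).all
      (fun p => decide (p * p > s) || !(PySem.Int.mod s p == 0))) = true ↔ GoodInt s := by
  set r : Int := ((Nat.sqrt limit.toNat : Nat) : Int) with hrdef
  rw [List.all_eq_true]
  constructor
  · intro H
    refine ⟨h2, fun m hm hmm hdvd => ?_⟩
    -- pass to the least prime factor q of m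
    set q : Nat := m.toNat.minFac with hq
    have hm2 : 2 ≤ m.toNat := by omega
    have hqp : Nat.Prime q := Nat.minFac_prime (by omega)
    have hq2 : 2 ≤ (q : Int) := by exact_mod_cast hqp.two_le
    have hqle : (q : Int) ≤ m := by
      have := Nat.minFac_le (n := m.toNat) (by omega)
      omega
    have hqdvd_m : (q : Int) ∣ m := by
      have h := Nat.minFac_dvd m.toNat
      have : ((q : Int)) ∣ ((m.toNat : Int)) := Int.natCast_dvd_natCast.mpr h
      rwa [Int.toNat_of_nonneg (by omega)] at this
    have hqdvd : (q : Int) ∣ s := hqdvd_m.trans hdvd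
    have hqq : (q : Int) * q ≤ s := by nlinarith
    have hqr : (q : Int) ≤ r := by
      have h1 : q * q ≤ limit.toNat := by
        have : ((q * q : Nat) : Int) ≤ ((limit.toNat : Int)) := by
          push_cast
          rw [Int.toNat_of_nonneg (by omega)]
          omega
        exact_mod_cast this
      have := Nat.le_sqrt.mpr h1
      omega
    have hqgood : GoodInt (q : Int) := by
      refine ⟨hq2, fun e he hee hedvd => ?_⟩
      have he' : e.toNat ∣ q := by
        have h := Int.natCast_dvd_natCast.mp
          (by rwa [Int.toNat_of_nonneg (by omega : (0:Int) ≤ e)] : ((e.toNat : Int)) ∣ ((q : Int) : Int))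
        exact_mod_cast h
      rcases (Nat.Prime.eq_one_or_self_of_dvd hqp e.toNat he') with h | h
      · omega
      · have : e = (q : Int) := by omega
        subst this
        nlinarith
    have hmem := good_mem_primes r q hq2 hqr hqgood
    have := H q hmem
    rw [Bool.or_eq_true, decide_eq_true_eq, Bool.not_eq_eq_eq_not, Bool.not_true,
      beq_eq_false_iff_ne] at this
    rcases this with h | h
    · omega
    · exact h ((PySem.Int.mod_eq_zero_iff_dvd s q).mpr hqdvd)
  · rintro ⟨-, H⟩ p hp
    obtain ⟨hpr, -⟩ := List.mem_filter.mp hp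
    obtain ⟨hp2, -⟩ := PySem.List.mem_pyRange_one.mp hpr
    rw [Bool.or_eq_true, decide_eq_true_eq, Bool.not_eq_eq_eq_not, Bool.not_true,
      beq_eq_false_iff_ne]
    by_cases hpp : p * p > s
    · exact Or.inl hpp
    · refine Or.inr (fun hmod => ?_)
      exact H p hp2 (by omega) ((PySem.Int.mod_eq_zero_iff_dvd s p).mp hmod)

-- ===== VERDICT (by name: the statement is the Claim_ definition above) =====
theorem count_number_prime_spec : Claim_equal_count_number_prime := by
  intro a b S1 S2 _
  unfold Spec_count_number_prime count_number_prime count_number_prime_alt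
  rw [nestedA, foldl_fA_eq_ddA, ddA_eq_filter_ofList]
  set L := S1.flatMap (fun i => S2.map (fun j => i + j)) with hL
  rw [PySem.List.dedup_eq_ofList]
  simp only [List.nil_append, List.not_mem_nil, not_false_eq_true, and_true]
  set D := PySem.Set.ofList L with hD
  -- A's filter condition splits into the range filter and the primality filter
  have hsplit : D.filter (fun x => decide (x ≥ a ∧ x ≤ b ∧ check_prime x = true))
      = (D.filter (fun s => decide (max 2 a ≤ s ∧ s ≤ b))).filter (fun s => check_prime s) := by
    rw [List.filter_filter]
    apply List.filter_congr
    intro t _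
    by_cases hp : check_prime t = true
    · have h2 : 2 ≤ t := ((check_prime_iff t).mp hp).1
      by_cases hr : t ≥ a ∧ t ≤ b
      · rw [decide_eq_true ⟨hr.1, hr.2, hp⟩, hp, decide_eq_true ⟨by omega, hr.2⟩]; rfl
      · rw [decide_eq_false (fun h => hr ⟨h.1, h.2.1⟩),
          decide_eq_false (fun h : max 2 a ≤ t ∧ t ≤ b => hr ⟨by omega, h.2⟩)]
        simp
    · rw [decide_eq_false (fun h => hp h.2.2)]
      simp [hp]
  rw [hsplit]
  set cand := D.filter (fun s => decide (max 2 a ≤ s ∧ s ≤ b)) with hcand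
  cases hmax : PySem.List.max? cand (fun x => x) with
  | none =>
    have hnil : cand = [] := (PySem.List.max?_eq_none_iff cand (fun x => x)).mp hmax
    rw [hnil]
    rfl
  | some limit =>
    apply List.filter_congr
    intro s hs
    have hrange := List.mem_filter.mp hs
    have h2 : 2 ≤ s := by
      have := of_decide_eq_true hrange.2
      omega
    have hsl : s ≤ limit := PySem.List.max?_isMax hmax s hs
    rw [Bool.eq_iff_iff, check_prime_iff s]
    exact (test_iff_good limit s h2 hsl).symm
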